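-- pv_equiv track=rewrite | github.com/caio86/g4m3 | treino/p0028.py | findIndexes
-- ===== SOURCE A (Python) =====
-- def findIndexes(lista):
--     indexes = {}
--
--     for i, v in enumerate(lista):
--         if v in indexes:
--             indexes[v].append(i)
--         else:
--             indexes[v] = [i]
--
--     return indexes
-- ===== SOURCE B (Python) =====
-- def findIndexes(lista):
--     return {v: [i for i, x in enumerate(lista) if x == v] for v in dict.fromkeys(lista)}
-- ===== Notes on version B (the rewrite author's own statement) =====
-- stated objective: idiomatic
-- what changed: Replaces the single-pass dict accumulation (membership test + append/insert per element) by a dict comprehension over dict.fromkeys(lista) that rescans the whole list once per distinct value.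
import Mathlib
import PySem

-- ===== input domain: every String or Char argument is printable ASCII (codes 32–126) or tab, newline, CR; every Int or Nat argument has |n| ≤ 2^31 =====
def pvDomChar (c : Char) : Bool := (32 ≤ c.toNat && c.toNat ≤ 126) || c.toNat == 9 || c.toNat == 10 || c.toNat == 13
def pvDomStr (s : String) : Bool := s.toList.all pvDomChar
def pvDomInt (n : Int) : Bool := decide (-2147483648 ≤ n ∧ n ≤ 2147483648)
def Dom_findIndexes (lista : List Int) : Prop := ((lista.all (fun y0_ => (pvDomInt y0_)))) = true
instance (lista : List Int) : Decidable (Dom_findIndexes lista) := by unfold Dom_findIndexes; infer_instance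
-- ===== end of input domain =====

-- B builds the grouping as a comprehension over the distinct values (one full rescan per value) instead of A's single accumulating dict pass; return values proved equal.

-- ===== PORT A =====
def findIndexes (lista : List Int) : List (Int × List Int) :=
  ((PySem.List.enumerate lista 0).foldl
    (fun (d : PySem.Dict Int (List Int)) p =>
      if d.contains p.2 then d.modify p.2 [] (fun l => l ++ [p.1])
      else d.insert p.2 [p.1])
    PySem.Dict.empty).items

-- ===== PORT B =====
def findIndexes_alt (lista : List Int) : List (Int × List Int) :=
  (PySem.List.dedup lista).map (fun v =>
    (v, ((PySem.List.enumerate lista 0).filter (fun p => p.2 == v)).map (fun p => p.1)))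

-- ===== PRECONDITION & SPEC =====
def Spec_findIndexes (lista : List Int) (out : List (Int × List Int)) : Prop := out = findIndexes_alt lista
instance (lista : List Int) (out : List (Int × List Int)) : Decidable (Spec_findIndexes lista out) := by unfold Spec_findIndexes; infer_instance

-- ===== CLAIM (what is proved, stated in full; the proofs are below) =====
def Claim_equal_findIndexes : Prop := ∀ (lista : List Int), Dom_findIndexes lista → Spec_findIndexes lista (findIndexes lista)

-- ===== LEMMAS AND PROOFS =====

theorem modify_eq_insert (d : PySem.Dict Int (List Int)) (k : Int) (f : List Int → List Int) :
    d.modify k [] f = d.insert k (f (d.getD k [])) := rfl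

-- A's two branches are both Python's d[v] = d.get(v, []) + [i]
theorem step_eq_modify (d : PySem.Dict Int (List Int)) (p : Int × Int) :
    (if d.contains p.2 then d.modify p.2 [] (fun l => l ++ [p.1])
     else d.insert p.2 [p.1]) = d.modify p.2 [] (fun l => l ++ [p.1]) := by
  by_cases h : d.contains p.2 = true
  · simp [h]
  · have hc : d.contains p.2 = false := by simpa using h
    have hg : d.getD p.2 ([] : List Int) = [] := PySem.Dict.getD_of_not_contains d [] hc
    rw [modify_eq_insert, hg]
    simp [hc]

-- items of a dict with Nodup keys, as a map over its keys
theorem items_eq_keys_map (d : PySem.Dict Int (List Int)) (h : d.keys.Nodup) :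
    d.items = d.keys.map (fun k => (k, d.getD k [])) := by
  have h1 : d.keys.map (fun k => (k, d.getD k [])) = d.items.map (fun p => (p.1, d.getD p.1 [])) := by
    simp only [PySem.Dict.keys, List.map_map]
    rfl
  rw [h1]
  have h2 : ∀ p ∈ d.items, (fun p : Int × List Int => (p.1, d.getD p.1 [])) p = id p := by
    intro p hp
    have h3 := PySem.Dict.getD_of_mem_items d
      (k := p.1) (v := p.2) (by simpa using hp) h ([] : List Int)
    simp [h3]
  rw [List.map_congr_left h2, List.map_id]

theorem keys_findIndexes (lista : List Int) :
    ((PySem.List.enumerate lista 0).foldl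
      (fun (d : PySem.Dict Int (List Int)) p => d.modify p.2 [] (fun l => l ++ [p.1]))
      PySem.Dict.empty).keys = PySem.List.dedup lista := by
  have h := PySem.Dict.keys_foldl_modify_key (PySem.List.enumerate lista 0) Prod.snd
      ([] : List Int) (fun _ p l => l ++ [p.1]) PySem.Dict.empty
  simpa [PySem.List.map_snd_enumerate, PySem.Set.update_nil_left, PySem.Dict.keys_empty] using h

theorem nodup_keys_findIndexes (lista : List Int) :
    ((PySem.List.enumerate lista 0).foldl
      (fun (d : PySem.Dict Int (List Int)) p => d.modify p.2 [] (fun l => l ++ [p.1]))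
      PySem.Dict.empty).keys.Nodup := by
  have h := PySem.Dict.nodup_keys_foldl_modify_key (PySem.List.enumerate lista 0) Prod.snd
      ([] : List Int) (fun _ p l => l ++ [p.1]) PySem.Dict.empty PySem.Dict.nodup_keys_empty
  simpa using h

theorem getD_findIndexes (lista : List Int) (v : Int) :
    ((PySem.List.enumerate lista 0).foldl
      (fun (d : PySem.Dict Int (List Int)) p => d.modify p.2 [] (fun l => l ++ [p.1]))
      PySem.Dict.empty).getD v [] =
    ((PySem.List.enumerate lista 0).filter (fun p => p.2 == v)).map (fun p => p.1) := by
  have h := PySem.Dict.getD_foldl_modify_append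
      ((PySem.List.enumerate lista 0).map (fun q : Int × Int => (q.2, q.1)))
      PySem.Dict.empty v
  rw [List.foldl_map] at h
  simpa [List.filter_map, Function.comp_def, List.map_map, PySem.Dict.getD_empty] using h

theorem findIndexes_eq_alt (lista : List Int) : findIndexes lista = findIndexes_alt lista := by
  unfold findIndexes findIndexes_alt
  have hf : (fun (d : PySem.Dict Int (List Int)) (p : Int × Int) =>
        if d.contains p.2 then d.modify p.2 [] (fun l => l ++ [p.1]) else d.insert p.2 [p.1])
      = fun (d : PySem.Dict Int (List Int)) (p : Int × Int) =>
          d.modify p.2 [] (fun l => l ++ [p.1]) := by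
    funext d p; exact step_eq_modify d p
  rw [hf, items_eq_keys_map _ (nodup_keys_findIndexes lista), keys_findIndexes]
  apply List.map_congr_left
  intro v _
  rw [getD_findIndexes]

-- ===== VERDICT (by name: the statement is the Claim_ definition above) =====
theorem findIndexes_spec : Claim_equal_findIndexes := by
  intro lista _
  unfold Spec_findIndexes
  exact findIndexes_eq_alt lista
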